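-- pv_equiv track=rewrite | github.com/shaonidutta/recruit-bot-ai | services/app/services/parsing_service.py | _extract_requirements
-- ===== SOURCE A (Python) =====
-- from typing import Dict, List, Any, Optional
--
-- def _extract_requirements(text: str) -> List[str]:
--     """Extract general job requirements"""
--     requirements = []
--     text_lower = text.lower()
--
--     # Work arrangement
--     if "remote" in text_lower:
--         requirements.append("Remote work capability")
--     if "on-site" in text_lower or "onsite" in text_lower:
--         requirements.append("On-site work required")
--     if "hybrid" in text_lower:
--         requirements.append("Hybrid work arrangement")
--
--     # Experience requirements
--     if "minimum" in text_lower and "years" in text_lower: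
--         requirements.append("Minimum experience requirement")
--     if "senior" in text_lower or "lead" in text_lower:
--         requirements.append("Senior-level position")
--     if "entry" in text_lower or "junior" in text_lower:
--         requirements.append("Entry-level position")
--
--     # Communication and soft skills
--     if any(term in text_lower for term in ["communication", "communicate"]):
--         requirements.append("Strong communication skills")
--     if any(term in text_lower for term in ["team", "collaboration", "collaborative"]):
--         requirements.append("Team collaboration")
--     if any(term in text_lower for term in ["leadership", "lead", "manage"]):
--         requirements.append("Leadership experience")
--
--     return requirements
-- ===== SOURCE B (Python) =====
-- from typing import Dict, List, Any, Optional
--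
-- # Ordered rules table: (label, groups); a label applies when every group has
-- # at least one term occurring in the lowercased text.
-- _RULES = [
--     ("Remote work capability", [["remote"]]),
--     ("On-site work required", [["on-site", "onsite"]]),
--     ("Hybrid work arrangement", [["hybrid"]]),
--     ("Minimum experience requirement", [["minimum"], ["years"]]),
--     ("Senior-level position", [["senior", "lead"]]),
--     ("Entry-level position", [["entry", "junior"]]),
--     ("Strong communication skills", [["communication", "communicate"]]),
--     ("Team collaboration", [["team", "collaboration", "collaborative"]]),
--     ("Leadership experience", [["leadership", "lead", "manage"]]),
-- ]
--
-- def _extract_requirements(text: str) -> List[str]: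
--     text_lower = text.lower()
--     return [label for label, groups in _RULES
--             if all(any(term in text_lower for term in group) for group in groups)]
-- ===== Notes on version B (the rewrite author's own statement) =====
-- stated objective: simpler
-- what changed: Replaces the nine hand-written if/append branches by one ordered (label, groups-of-alternative-terms) rules table scanned with a single comprehension, encoding the conjunctive experience branch as two singleton groups.
import Mathlib
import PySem

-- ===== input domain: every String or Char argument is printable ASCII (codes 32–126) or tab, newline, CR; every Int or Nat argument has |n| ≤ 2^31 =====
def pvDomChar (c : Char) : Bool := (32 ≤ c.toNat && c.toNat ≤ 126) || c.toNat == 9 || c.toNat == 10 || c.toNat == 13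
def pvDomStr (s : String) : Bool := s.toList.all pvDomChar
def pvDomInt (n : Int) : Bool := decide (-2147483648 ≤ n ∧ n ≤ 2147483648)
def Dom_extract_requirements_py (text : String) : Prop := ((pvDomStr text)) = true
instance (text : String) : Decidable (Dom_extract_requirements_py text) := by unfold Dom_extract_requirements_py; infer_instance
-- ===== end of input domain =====

-- B replaces A's nine hand-written if-branches by one ordered rules table scanned once (simpler data-driven form, same output).

-- ===== PORT A =====
def extract_requirements_py (text : String) : List String :=
  let requirements : List String := []
  let text_lower := PySem.Str.lower text
  let requirements := if PySem.Str.isIn "remote" text_lower then requirements ++ ["Remote work capability"] else requirements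
  let requirements := if PySem.Str.isIn "on-site" text_lower || PySem.Str.isIn "onsite" text_lower then requirements ++ ["On-site work required"] else requirements
  let requirements := if PySem.Str.isIn "hybrid" text_lower then requirements ++ ["Hybrid work arrangement"] else requirements
  let requirements := if PySem.Str.isIn "minimum" text_lower && PySem.Str.isIn "years" text_lower then requirements ++ ["Minimum experience requirement"] else requirements
  let requirements := if PySem.Str.isIn "senior" text_lower || PySem.Str.isIn "lead" text_lower then requirements ++ ["Senior-level position"] else requirements
  let requirements := if PySem.Str.isIn "entry" text_lower || PySem.Str.isIn "junior" text_lower then requirements ++ ["Entry-level position"] else requirements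
  let requirements := if (["communication", "communicate"] : List String).any (fun term => PySem.Str.isIn term text_lower) then requirements ++ ["Strong communication skills"] else requirements
  let requirements := if (["team", "collaboration", "collaborative"] : List String).any (fun term => PySem.Str.isIn term text_lower) then requirements ++ ["Team collaboration"] else requirements
  let requirements := if (["leadership", "lead", "manage"] : List String).any (fun term => PySem.Str.isIn term text_lower) then requirements ++ ["Leadership experience"] else requirements
  requirements

-- ===== PORT B =====
def pvRules : List (String × List (List String)) :=
  [("Remote work capability", [["remote"]]),
   ("On-site work required", [["on-site", "onsite"]]),
   ("Hybrid work arrangement", [["hybrid"]]),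
   ("Minimum experience requirement", [["minimum"], ["years"]]),
   ("Senior-level position", [["senior", "lead"]]),
   ("Entry-level position", [["entry", "junior"]]),
   ("Strong communication skills", [["communication", "communicate"]]),
   ("Team collaboration", [["team", "collaboration", "collaborative"]]),
   ("Leadership experience", [["leadership", "lead", "manage"]])]

def extract_requirements_py_alt (text : String) : List String :=
  let text_lower := PySem.Str.lower text
  (pvRules.filter
      (fun r => r.2.all (fun group => group.any (fun term => PySem.Str.isIn term text_lower)))).map
    Prod.fst

-- ===== PRECONDITION & SPEC =====
def Spec_extract_requirements_py (text : String) (out : List String) : Prop := out = extract_requirements_py_alt text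
instance (text : String) (out : List String) : Decidable (Spec_extract_requirements_py text out) := by unfold Spec_extract_requirements_py; infer_instance

-- ===== CLAIM (what is proved, stated in full; the proofs are below) =====
def Claim_equal_extract_requirements_py : Prop := ∀ (text : String), Dom_extract_requirements_py text → Spec_extract_requirements_py text (extract_requirements_py text)

-- ===== LEMMAS AND PROOFS =====

-- Pull the untouched accumulator out of a conditional append (normalises A's if-chain).
theorem pv_append_if {α : Type} (c : Bool) (r s : List α) :
    (if c = true then r ++ s else r) = r ++ (if c = true then s else []) := by
  cases c <;> simp

-- One step of B's filter-then-map over the rules table, as an optional singleton prepend.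
theorem pv_filtermap_cons {α β : Type} (p : α × β → Bool) (a : α × β) (as : List (α × β)) :
    (((a :: as).filter p).map Prod.fst)
      = (if p a = true then [a.1] else []) ++ ((as.filter p).map Prod.fst) := by
  rw [List.filter_cons]; split <;> simp

-- ===== VERDICT (by name: the statement is the Claim_ definition above) =====
theorem extract_requirements_py_spec : Claim_equal_extract_requirements_py := by
  intro text _
  unfold Spec_extract_requirements_py extract_requirements_py extract_requirements_py_alt pvRules
  simp only []
  repeat rw [pv_append_if]
  simp only [pv_filtermap_cons, List.filter_nil, List.map_nil,
    List.all_cons, List.all_nil, List.any_cons, List.any_nil,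
    Bool.or_false, Bool.and_true,
    List.nil_append, List.append_nil, List.append_assoc]
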